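-- pv_equiv track=rewrite | github.com/AhmedHossam8/tender-pilot | backend/apps/ai_engine/services/rag.py | match_requirements
-- ===== SOURCE A (Python) =====
-- from typing import List, Dict
--
-- def match_requirements(requirements: List[str], proposals: List[Dict], top_k: int = 3) -> List[Dict]:
--     """
--     Simple keyword matching for MVP. Returns top_k proposals relevant to the requirements.
--     """
--     matched = []
--     for proposal in proposals:
--         score = 0
--         sections_text = " ".join(proposal.get("sections", {}).values())
--         for req in requirements:
--             if req.lower() in sections_text.lower():
--                 score += 1
--         if score > 0:
--             matched.append((score, proposal))
--
--     # Sort by score descending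
--     matched.sort(key=lambda x: x[0], reverse=True)
--     return [p for _, p in matched[:top_k]]
-- ===== SOURCE B (Python) =====
-- from typing import List, Dict
--
-- def match_requirements(requirements: List[str], proposals: List[Dict], top_k: int = 3) -> List[Dict]:
--     """Score every proposal with a comprehension, collect score buckets from high to low, flatten, slice."""
--     reqs = [r.lower() for r in requirements]
--
--     def score(proposal):
--         text = " ".join(proposal.get("sections", {}).values()).lower()
--         return sum(r in text for r in reqs)
--
--     scored = [(score(p), p) for p in proposals]
--     buckets = [[p for sc, p in scored if sc == s]
--                for s in range(len(requirements), 0, -1)]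
--     ranked = [p for bucket in buckets for p in bucket]
--     return ranked[:top_k]
-- ===== Notes on version B (the rewrite author's own statement) =====
-- stated objective: alternative
-- what changed: Scores all proposals in one comprehension (lowercasing each requirement and each text once, no explicit accumulator loop and no score>0 branch) and ranks by collecting per-score buckets from the highest possible score down instead of comparison-sorting (score, proposal) tuples.
import Mathlib
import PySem

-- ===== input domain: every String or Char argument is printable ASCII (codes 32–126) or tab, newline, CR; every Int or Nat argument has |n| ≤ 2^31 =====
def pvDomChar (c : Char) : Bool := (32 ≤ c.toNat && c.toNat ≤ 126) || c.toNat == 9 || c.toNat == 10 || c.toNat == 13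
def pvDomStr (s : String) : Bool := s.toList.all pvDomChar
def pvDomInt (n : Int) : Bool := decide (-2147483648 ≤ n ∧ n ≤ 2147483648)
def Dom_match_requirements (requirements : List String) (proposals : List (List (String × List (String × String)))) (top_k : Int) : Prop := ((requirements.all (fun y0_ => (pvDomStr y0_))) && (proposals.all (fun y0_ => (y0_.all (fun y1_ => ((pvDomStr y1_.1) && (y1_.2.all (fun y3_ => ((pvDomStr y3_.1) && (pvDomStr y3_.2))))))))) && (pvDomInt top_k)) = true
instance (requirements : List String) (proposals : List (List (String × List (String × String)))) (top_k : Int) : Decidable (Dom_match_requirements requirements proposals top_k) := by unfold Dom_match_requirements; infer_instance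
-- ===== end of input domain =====

-- B scores every proposal in one comprehension (each requirement and text lowercased once, no accumulator loop, no score>0 branch) and ranks by per-score buckets from high to low instead of a comparison sort; same return value.
-- ===== PORT A =====
-- shared helper: ' " ".join(proposal.get("sections", {}).values()) '
def pvSectionsText (proposal : List (String × List (String × String))) : String :=
  PySem.Str.join " " (PySem.Dict.values (PySem.Dict.mk ((PySem.Dict.get? (PySem.Dict.mk proposal) "sections").getD [])))

def match_requirements (requirements : List String) (proposals : List (List (String × List (String × String)))) (top_k : Int) : List (List (String × List (String × String))) :=
  let matched : List (Int × List (String × List (String × String))) :=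
    proposals.foldl (fun matched proposal =>
      let sections_text := pvSectionsText proposal
      let score := requirements.foldl (fun score req =>
        if PySem.Str.isIn (PySem.Str.lower req) (PySem.Str.lower sections_text) then score + 1 else score) (0 : Int)
      if score > 0 then matched ++ [(score, proposal)] else matched) []
  let matched := PySem.List.sorted matched (fun x => x.1) true
  (PySem.List.slice matched none (some top_k)).map (fun p => p.2)

-- ===== PORT B =====
-- 'def score(proposal): …' of Source B
def pvScoreB (reqs : List String) (proposal : List (String × List (String × String))) : Int :=
  let text := PySem.Str.lower (pvSectionsText proposal)
  (reqs.map (fun r => if PySem.Str.isIn r text then (1 : Int) else 0)).sum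

def match_requirements_alt (requirements : List String) (proposals : List (List (String × List (String × String)))) (top_k : Int) : List (List (String × List (String × String))) :=
  let reqs := requirements.map PySem.Str.lower
  let scored := proposals.map (fun p => (pvScoreB reqs p, p))
  let buckets := (PySem.List.pyRange (requirements.length : Int) 0 (-1)).map
      (fun s => (scored.filter (fun q => q.1 == s)).map (fun q => q.2))
  PySem.List.slice buckets.flatten none (some top_k)

-- ===== PRECONDITION & SPEC =====
def Spec_match_requirements (requirements : List String) (proposals : List (List (String × List (String × String)))) (top_k : Int) (out : List (List (String × List (String × String)))) : Prop := out = match_requirements_alt requirements proposals top_k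
instance (requirements : List String) (proposals : List (List (String × List (String × String)))) (top_k : Int) (out : List (List (String × List (String × String)))) : Decidable (Spec_match_requirements requirements proposals top_k out) := by unfold Spec_match_requirements; infer_instance

-- ===== CLAIM (what is proved, stated in full; the proofs are below) =====
def Claim_equal_match_requirements : Prop := ∀ (requirements : List String) (proposals : List (List (String × List (String × String)))) (top_k : Int), Dom_match_requirements requirements proposals top_k → Spec_match_requirements requirements proposals top_k (match_requirements requirements proposals top_k)

-- ===== LEMMAS AND PROOFS =====

-- helper: insertBy passes over a block in which nothing is 'before'
lemma insertBy_append_not_before {α : Type} (before : α → α → Bool) (x : α) (big rest : List α)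
    (h : ∀ y ∈ big, before x y = false) :
    PySem.List.insertBy before x (big ++ rest) = big ++ PySem.List.insertBy before x rest := by
  induction big with
  | nil => rfl
  | cons y ys ih =>
    simp only [List.cons_append, PySem.List.insertBy, h y (by simp)]
    simp only [Bool.false_eq_true, if_false, List.cons_inj_right]
    exact ih (fun z hz => h z (by simp [hz]))

lemma insertBy_all_before {α : Type} (before : α → α → Bool) (x : α) (ys : List α)
    (h : ∀ y ∈ ys, before x y = true) :
    PySem.List.insertBy before x ys = x :: ys := by
  cases ys with
  | nil => rfl
  | cons y ys => simp [PySem.List.insertBy, h y (by simp)]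

-- split a countdown range at an interior point
lemma pyRange_neg_one_split (R b k : Int) (h1 : b < k) (h2 : k ≤ R + 1) :
    PySem.List.pyRange R b (-1) = PySem.List.pyRange R (k-1) (-1) ++ PySem.List.pyRange (k-1) b (-1) := by
  rw [PySem.List.pyRange_neg_one_eq_reverse, PySem.List.pyRange_neg_one_eq_reverse,
      PySem.List.pyRange_neg_one_eq_reverse]
  simp only [sub_add_cancel]
  rw [PySem.List.pyRange_one_append (b+1) k (R+1) (by omega) h2, List.reverse_append]

lemma pyRange_neg_one_singleton (k : Int) : PySem.List.pyRange k (k-1) (-1) = [k] := by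
  rw [PySem.List.pyRange_neg_one_cons (by omega), PySem.List.pyRange_neg_one_eq_nil (by omega)]

-- stable descending sort by an Int key bounded in (0, R] is bucket collection from R down to 1
lemma sorted_rev_eq_buckets {β : Type} (xs : List (Int × β)) (R : Int)
    (h : ∀ p ∈ xs, 0 < p.1 ∧ p.1 ≤ R) :
    PySem.List.sorted xs (fun x => x.1) true
      = (PySem.List.pyRange R 0 (-1)).flatMap (fun s => xs.filter (fun p => p.1 == s)) := by
  rw [PySem.List.sorted_rev_eq_foldl_insertBy]
  induction xs using List.reverseRecOn with
  | nil => simp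
  | append_singleton xs x ih =>
    have hx := h x (by simp)
    have hxs : ∀ p ∈ xs, 0 < p.1 ∧ p.1 ≤ R := fun p hp => h p (by simp [hp])
    rw [List.foldl_append, List.foldl_cons, List.foldl_nil, ih hxs]
    rw [pyRange_neg_one_split R 0 x.1 hx.1 (by omega),
        pyRange_neg_one_split R (x.1 - 1) (x.1 + 1) (by omega) (by omega)]
    simp only [add_sub_cancel_right, pyRange_neg_one_singleton]
    rw [List.flatMap_append, List.flatMap_append, List.flatMap_append, List.flatMap_append]
    rw [insertBy_append_not_before _ _ _ _ (by
      intro y hy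
      rcases List.mem_flatMap.mp ((List.flatMap_append ▸ hy : y ∈ _)) with ⟨s, hs, hyf⟩
      have hsr : x.1 - 1 < s := by
        rcases List.mem_append.mp hs with hs' | hs'
        · exact lt_trans (by omega) (PySem.List.mem_pyRange_neg_one.mp hs').1
        · simp only [List.mem_singleton] at hs'; omega
      have : y.1 = s := by simpa using (List.mem_filter.mp hyf).2
      simp only [decide_eq_false_iff_not, not_lt]
      omega)]
    rw [insertBy_all_before _ _ _ (by
      intro y hy
      rcases List.mem_flatMap.mp hy with ⟨s, hs, hyf⟩
      have hsr := (PySem.List.mem_pyRange_neg_one.mp hs)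
      have : y.1 = s := by simpa using (List.mem_filter.mp hyf).2
      simp only [decide_eq_true_eq]
      omega)]
    have hBig : ((PySem.List.pyRange R x.1 (-1)).flatMap fun s => (xs ++ [x]).filter (fun p => p.1 == s))
        = (PySem.List.pyRange R x.1 (-1)).flatMap fun s => xs.filter (fun p => p.1 == s) := by
      refine List.flatMap_congr (fun s hs => ?_)
      have := (PySem.List.mem_pyRange_neg_one.mp hs).1
      rw [List.filter_append]
      simp only [List.filter_cons, List.filter_nil]
      have : (x.1 == s) = false := by simp; omega
      simp [this]
    have hSmall : ((PySem.List.pyRange (x.1 - 1) 0 (-1)).flatMap fun s => (xs ++ [x]).filter (fun p => p.1 == s))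
        = (PySem.List.pyRange (x.1 - 1) 0 (-1)).flatMap fun s => xs.filter (fun p => p.1 == s) := by
      refine List.flatMap_congr (fun s hs => ?_)
      have := (PySem.List.mem_pyRange_neg_one.mp hs).2
      rw [List.filter_append]
      simp only [List.filter_cons, List.filter_nil]
      have : (x.1 == s) = false := by simp; omega
      simp [this]
    rw [hBig, hSmall]
    simp [List.filter_append]

-- A's inner counting loop computes the same score as B's 0/1 sum
lemma scoreA_eq_scoreB (requirements : List String) (proposal : List (String × List (String × String))) :
    requirements.foldl (fun score req =>
        if PySem.Str.isIn (PySem.Str.lower req) (PySem.Str.lower (pvSectionsText proposal)) then score + 1 else score) (0 : Int)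
      = pvScoreB (requirements.map PySem.Str.lower) proposal := by
  rw [PySem.List.foldl_if_add_one, pvScoreB, PySem.List.sum_map_ite_one_zero]
  simp [List.countP_map, Function.comp_def]

-- B's score never exceeds the number of requirements
lemma scoreB_le (reqs : List String) (proposal : List (String × List (String × String))) :
    pvScoreB reqs proposal ≤ (reqs.length : Int) := by
  rw [pvScoreB, PySem.List.sum_map_ite_one_zero]
  exact_mod_cast List.countP_le_length (l := reqs)

-- slice commutes with map
lemma slice_map {α β : Type} (f : α → β) (xs : List α) (a b : Option Int) :
    PySem.List.slice (xs.map f) a b = (PySem.List.slice xs a b).map f := by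
  simp only [PySem.List.slice, List.length_map]
  rw [List.map_take, List.map_drop]

-- ===== VERDICT (by name: the statement is the Claim_ definition above) =====
theorem match_requirements_spec : Claim_equal_match_requirements := by
  intro requirements proposals top_k _
  unfold Spec_match_requirements match_requirements match_requirements_alt
  simp only [scoreA_eq_scoreB]
  set g := fun p : List (String × List (String × String)) => (pvScoreB (requirements.map PySem.Str.lower) p, p) with hg
  -- A's fold with the 'score > 0' append is a filter-then-map
  rw [PySem.List.foldl_append_ite
        (p := fun p => pvScoreB (requirements.map PySem.Str.lower) p > 0) (f := g), List.nil_append]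
  -- descending stable sort = bucket collection from len(requirements) down to 1
  rw [sorted_rev_eq_buckets _ (requirements.length : Int) (by
    intro p hp
    rcases List.mem_map.mp hp with ⟨q, hq, rfl⟩
    have hq' := of_decide_eq_true (List.mem_filter.mp hq).2
    refine ⟨hq', ?_⟩
    simpa using scoreB_le (requirements.map PySem.Str.lower) q)]
  rw [← slice_map, List.map_flatMap, ← List.flatMap_def]
  congr 1
  refine List.flatMap_congr (fun s hs => ?_)
  have hs1 := (PySem.List.mem_pyRange_neg_one.mp hs).1
  rw [List.filter_map, List.filter_map, List.filter_filter]
  congr 2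
  refine List.filter_congr (fun p _ => ?_)
  simp only [Function.comp_def, hg]
  by_cases h : pvScoreB (requirements.map PySem.Str.lower) p = s
  · simp [h]; omega
  · simp [h]
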